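-- pv_equiv track=rewrite | github.com/LucyyyyyyT/markdown-compiler | markdown_compiler/util/line_functions.py | compile_code_inline
-- ===== SOURCE A (Python) =====
-- def compile_code_inline(line):
--     if line.startswith("```"):
--         return line
--
--     result = ""
--     i = 0
--
--     while i < len(line):
--         if line[i] == "`":
--             end = line.find("`", i + 1)
--
--             if end == -1:
--                 result += line[i]
--                 i += 1
--             else:
--                 code = line[i + 1:end]
--                 code = code.replace("&", "&amp;")
--                 code = code.replace("<", "&lt;")
--                 code = code.replace(">", "&gt;")
--
--                 result += "<code>" + code + "</code>"
--                 i = end + 1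
--         else:
--             result += line[i]
--             i += 1
--
--     return result
-- ===== SOURCE B (Python) =====
-- def _escape(code):
--     return code.replace("&", "&amp;").replace("<", "&lt;").replace(">", "&gt;")
--
--
-- def compile_code_inline(line):
--     if line.startswith("```"):
--         return line
--
--     parts = line.split("`")
--     out = [parts[0]]
--     i = 1
--     while i < len(parts):
--         if i + 1 < len(parts):
--             out.append("<code>" + _escape(parts[i]) + "</code>" + parts[i + 1])
--             i += 2
--         else:
--             out.append("`" + parts[i])
--             i += 1
--     return "".join(out)
-- ===== Notes on version B (the rewrite author's own statement) =====
-- stated objective: faster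
-- what changed: Replaces the index-based while loop (char-by-char string concatenation plus repeated find and slicing) with a single split on the backtick separator, pairing consecutive parts into code spans and joining the pieces once at the end.
import Mathlib
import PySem

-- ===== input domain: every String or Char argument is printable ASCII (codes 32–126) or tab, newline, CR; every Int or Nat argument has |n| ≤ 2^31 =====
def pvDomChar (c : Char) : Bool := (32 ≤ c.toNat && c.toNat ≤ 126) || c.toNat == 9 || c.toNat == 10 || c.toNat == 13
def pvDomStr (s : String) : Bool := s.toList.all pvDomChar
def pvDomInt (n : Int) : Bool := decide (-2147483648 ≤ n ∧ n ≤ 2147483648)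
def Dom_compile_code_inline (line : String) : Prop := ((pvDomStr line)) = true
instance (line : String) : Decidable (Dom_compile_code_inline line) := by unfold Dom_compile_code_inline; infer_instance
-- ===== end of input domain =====

-- B replaces A's index-based scan (char loop with += concatenation, line.find, slices) by one
-- split on the backtick separator and a pairing loop over the parts, joined once at the end;
-- objective: faster (A's += concatenation is quadratic). Equivalence proved for all inputs.

-- ===== PORT A =====

-- the three sequential Python .replace calls on a code segment (exact via PySem.Chars.replace)
def pvEsc (cs : List Char) : List Char :=
  PySem.Chars.replace
    (PySem.Chars.replace (PySem.Chars.replace cs ['&'] "&amp;".toList) ['<'] "&lt;".toList)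
    ['>'] "&gt;".toList

-- line.find("`", i+1) relative to the suffix after position i: returns the chars strictly
-- between i and the found backtick (= line[i+1:end]) and the suffix after it (= from end+1);
-- none = -1. Exact: Python's find of a single char is the first occurrence.
def pvAFind : List Char → Option (List Char × List Char)
  | [] => none
  | c :: cs =>
    if c = '`' then some ([], cs)
    else match pvAFind cs with
         | none => none
         | some (b, a) => some (c :: b, a)

theorem pvAFind_len : ∀ (cs b a : List Char), pvAFind cs = some (b, a) → a.length < cs.length := by
  intro cs
  induction cs with
  | nil => intro b a h; simp [pvAFind] at h
  | cons c cs ih =>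
    intro b a h
    simp only [pvAFind] at h
    split at h
    · injection h with h'
      rw [Prod.mk.injEq] at h'
      obtain ⟨h1, h2⟩ := h'
      subst h2; simp
    · cases hf : pvAFind cs with
      | none => rw [hf] at h; simp at h
      | some p =>
        rw [hf] at h
        cases p with
        | mk b' a' =>
          injection h with h'
          rw [Prod.mk.injEq] at h'
          obtain ⟨h1, h2⟩ := h'
          have := ih b' a' hf
          subst h2
          simp
          omega

-- A's while loop, as structural recursion on the remaining suffix line[i:], same state and
-- branch order as the Python (exact: i only moves forward, so the suffix is the state).
def pvALoop : List Char → List Char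
  | [] => []
  | c :: rest =>
    if c = '`' then
      match _h : pvAFind rest with
      | none => c :: pvALoop rest
      | some (code, after) =>
        "<code>".toList ++ pvEsc code ++ "</code>".toList ++ pvALoop after
    else c :: pvALoop rest
termination_by cs => cs.length
decreasing_by
  · simp
  · have := pvAFind_len rest code after _h; simp; omega
  · simp

def compile_code_inline (line : String) : String :=
  if PySem.Str.startswith line "```" then line
  else String.ofList (pvALoop line.toList)

-- ===== PORT B =====

-- line.split("`") for the one-char separator (exact port of str.split with a 1-char sep:
-- the maximal backtick-free segments, with empty segments kept; "" ↦ [""]).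
def pvTickSplit : List Char → List (List Char)
  | [] => [[]]
  | c :: cs =>
    if c = '`' then [] :: pvTickSplit cs
    else match pvTickSplit cs with
         | [] => [[c]]   -- unreachable: pvTickSplit never returns []
         | p :: ps => (c :: p) :: ps

-- B's while loop over parts[1:], two parts per matched span, one per unmatched tail
def pvBLoop : List (List Char) → List Char
  | [] => []
  | [p] => '`' :: p
  | p :: q :: rest => "<code>".toList ++ pvEsc p ++ "</code>".toList ++ q ++ pvBLoop rest

def compile_code_inline_alt (line : String) : String :=
  if PySem.Str.startswith line "```" then line
  else match pvTickSplit line.toList with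
       | [] => ""   -- unreachable
       | p :: ps => String.ofList (p ++ pvBLoop ps)

-- ===== PRECONDITION & SPEC =====
def Spec_compile_code_inline (line : String) (out : String) : Prop := out = compile_code_inline_alt line
instance (line : String) (out : String) : Decidable (Spec_compile_code_inline line out) := by unfold Spec_compile_code_inline; infer_instance

-- ===== CLAIM (what is proved, stated in full; the proofs are below) =====
def Claim_equal_compile_code_inline : Prop := ∀ (line : String), Dom_compile_code_inline line → Spec_compile_code_inline line (compile_code_inline line)

-- ===== LEMMAS AND PROOFS =====

theorem pvALoop_nil : pvALoop [] = [] := by simp [pvALoop]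

theorem pvALoop_cons_ne (c : Char) (rest : List Char) (h : c ≠ '`') :
    pvALoop (c :: rest) = c :: pvALoop rest := by
  rw [pvALoop]
  rw [if_neg h]

theorem pvALoop_tick_none (rest : List Char) (hf : pvAFind rest = none) :
    pvALoop ('`' :: rest) = '`' :: pvALoop rest := by
  rw [pvALoop, if_pos rfl]
  split <;> simp_all

theorem pvALoop_tick_some (rest code after : List Char) (hf : pvAFind rest = some (code, after)) :
    pvALoop ('`' :: rest) = "<code>".toList ++ pvEsc code ++ "</code>".toList ++ pvALoop after := by
  rw [pvALoop, if_pos rfl]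
  split <;> simp_all

theorem pvTickSplit_ne_nil (cs : List Char) : pvTickSplit cs ≠ [] := by
  cases cs with
  | nil => simp [pvTickSplit]
  | cons c cs =>
    simp only [pvTickSplit]
    split
    · simp
    · split <;> simp

-- no backtick in cs: split is a single part
theorem pvTickSplit_of_find_none : ∀ (cs : List Char), pvAFind cs = none → pvTickSplit cs = [cs] := by
  intro cs
  induction cs with
  | nil => intro _; rfl
  | cons c cs ih =>
    intro h
    simp only [pvAFind] at h
    split at h
    · simp at h
    · cases hf : pvAFind cs with
      | none => simp only [pvTickSplit]; rw [if_neg (by assumption), ih hf]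
      | some p => rw [hf] at h; cases p; simp at h

-- a first backtick splits cs into its first part and the split of the suffix after it
theorem pvTickSplit_of_find_some : ∀ (cs code after : List Char),
    pvAFind cs = some (code, after) → pvTickSplit cs = code :: pvTickSplit after := by
  intro cs
  induction cs with
  | nil => intro code after h; simp [pvAFind] at h
  | cons c cs ih =>
    intro code after h
    simp only [pvAFind] at h
    split at h
    · injection h with h'
      rw [Prod.mk.injEq] at h'
      obtain ⟨h1, h2⟩ := h'
      subst h1; subst h2
      simp only [pvTickSplit]
      rw [if_pos (by assumption)]
    · cases hf : pvAFind cs with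
      | none => rw [hf] at h; simp at h
      | some p =>
        rw [hf] at h
        cases p with
        | mk b' a' =>
          injection h with h'
          rw [Prod.mk.injEq] at h'
          obtain ⟨h1, h2⟩ := h'
          subst h2
          simp only [pvTickSplit]
          rw [if_neg (by assumption), ih b' a' hf, ← h1]

-- no backtick: A's loop copies the suffix verbatim
theorem pvALoop_of_find_none : ∀ (cs : List Char), pvAFind cs = none → pvALoop cs = cs := by
  intro cs
  induction cs with
  | nil => intro _; exact pvALoop_nil
  | cons c cs ih =>
    intro h
    simp only [pvAFind] at h
    split at h
    · simp at h
    · cases hf : pvAFind cs with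
      | none => rw [pvALoop_cons_ne c cs (by assumption), ih hf]
      | some p => rw [hf] at h; cases p; simp at h

-- main invariant: A's scan equals head-of-split ++ B's pairing loop over the tail
theorem pvMain : ∀ (n : ℕ) (cs p : List Char) (ps : List (List Char)), cs.length ≤ n →
    pvTickSplit cs = p :: ps → pvALoop cs = p ++ pvBLoop ps := by
  intro n
  induction n with
  | zero =>
    intro cs p ps hn hs
    have : cs = [] := List.eq_nil_of_length_eq_zero (Nat.le_zero.mp hn)
    subst this
    simp [pvTickSplit] at hs
    obtain ⟨h1, h2⟩ := hs
    subst h1; subst h2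
    simp [pvALoop_nil, pvBLoop]
  | succ n ih =>
    intro cs p ps hn hs
    cases cs with
    | nil =>
      simp [pvTickSplit] at hs
      obtain ⟨h1, h2⟩ := hs
      subst h1; subst h2
      simp [pvALoop_nil, pvBLoop]
    | cons c rest =>
      by_cases hc : c = '`'
      · subst hc
        simp only [pvTickSplit, if_pos] at hs
        cases hs
        cases hf : pvAFind rest with
        | none =>
          rw [pvTickSplit_of_find_none rest hf, pvALoop_tick_none rest hf,
              pvALoop_of_find_none rest hf]
          simp [pvBLoop]
        | some pr =>
          cases pr with
          | mk code after =>
            rw [pvTickSplit_of_find_some rest code after hf]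
            obtain ⟨q, qs, hq⟩ : ∃ q qs, pvTickSplit after = q :: qs := by
              cases h' : pvTickSplit after with
              | nil => exact absurd h' (pvTickSplit_ne_nil after)
              | cons q qs => exact ⟨q, qs, rfl⟩
            rw [hq, pvALoop_tick_some rest code after hf]
            have hlen : after.length ≤ n := by
              have := pvAFind_len rest code after hf
              simp at hn; omega
            rw [ih after q qs hlen hq]
            simp [pvBLoop]
      · simp only [pvTickSplit] at hs
        rw [if_neg hc] at hs
        obtain ⟨q, qs, hq⟩ : ∃ q qs, pvTickSplit rest = q :: qs := by
          cases h' : pvTickSplit rest with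
          | nil => exact absurd h' (pvTickSplit_ne_nil rest)
          | cons q qs => exact ⟨q, qs, rfl⟩
        rw [hq] at hs
        have h1 : c :: q = p := (List.cons.injEq .. ▸ hs).1
        have h2 : qs = ps := (List.cons.injEq .. ▸ hs).2
        subst h2
        have hlen : rest.length ≤ n := by simp at hn; omega
        rw [pvALoop_cons_ne c rest hc, ih rest q qs hlen hq, ← h1]
        simp

-- ===== VERDICT (by name: the statement is the Claim_ definition above) =====
theorem compile_code_inline_spec : Claim_equal_compile_code_inline := by
  intro line _
  unfold Spec_compile_code_inline compile_code_inline compile_code_inline_alt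
  split
  · rfl
  · obtain ⟨p, ps, hq⟩ : ∃ p ps, pvTickSplit line.toList = p :: ps := by
      cases h' : pvTickSplit line.toList with
      | nil => exact absurd h' (pvTickSplit_ne_nil line.toList)
      | cons p ps => exact ⟨p, ps, rfl⟩
    rw [hq, pvMain line.toList.length line.toList p ps le_rfl hq]
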